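-- pv_equiv track=rewrite | github.com/francocuervoo/ip | parciales/parcial_02/submission.py | dame_el_que_falta
-- ===== SOURCE A (Python) =====
-- def dame_el_que_falta(s: list[tuple[int,int]]) -> tuple[int,int]:
--     maximo : int = obtener_maximo_tupla(s)
--     tuplas_totales : list[tuple[int,int]] = generar_tuplas_combinatoria(maximo)
--     res : tuple[int,int] = (1,1)
--
--     for tupla in tuplas_totales:
--         if not esta_la_tupla_incluida(tupla, s):
--             res = tupla
--     return res
--
-- def obtener_maximo_tupla (tupla : list[tuple[int,int]]) -> int:
--     maximo_primera_componente : int = tupla[0][0]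
--     maximo_segunda_componene : int = tupla[0][1]
--     res : int = 0
--
--     for i in range(len(tupla)):
--         if tupla[i][0] > maximo_primera_componente:
--             maximo_primera_componente = tupla[i][0]
--         if tupla[i][1] > maximo_segunda_componene:
--             maximo_segunda_componene = tupla[i][1]
--
--     if maximo_primera_componente > maximo_segunda_componene:
--         res = maximo_primera_componente
--     else:
--         res = maximo_segunda_componene
--
--     return res
--
-- def esta_la_tupla_incluida ( tupla: tuple[int,int], tuplas : list[tuple[int,int]]) -> bool:
--
--     for tup in tuplas:
--         if tup == tupla:
--             return True
--     return False
--
-- def generar_tuplas_combinatoria (maximo: int) -> list[tuple[int,int]]: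
--     tuplas : list[tuple[int,int]] = []
--
--     for i in range(1, maximo +1):
--         for j in range(1, maximo +1):
--             tuplas.append((i,j))
--
--     return tuplas
-- ===== SOURCE B (Python) =====
-- def dame_el_que_falta(s: list[tuple[int, int]]) -> tuple[int, int]:
--     maximo = max(max(a, b) for (a, b) in s)
--     presentes = set(s)
--     for i in range(maximo, 0, -1):
--         for j in range(maximo, 0, -1):
--             if (i, j) not in presentes:
--                 return (i, j)
--     return (1, 1)
-- ===== Notes on version B (the rewrite author's own statement) =====
-- stated objective: faster
-- what changed: A materialises the full maximo x maximo grid and scans it forward remembering the last missing tuple, with a linear list-membership scan per grid cell; B never builds the grid: it scans the coordinates backwards with an early exit at the first missing tuple, testing membership in a set built once.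
-- outside the precondition, e.g. on dame_el_que_falta([]): A raises IndexError, B raises ValueError
import Mathlib
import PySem

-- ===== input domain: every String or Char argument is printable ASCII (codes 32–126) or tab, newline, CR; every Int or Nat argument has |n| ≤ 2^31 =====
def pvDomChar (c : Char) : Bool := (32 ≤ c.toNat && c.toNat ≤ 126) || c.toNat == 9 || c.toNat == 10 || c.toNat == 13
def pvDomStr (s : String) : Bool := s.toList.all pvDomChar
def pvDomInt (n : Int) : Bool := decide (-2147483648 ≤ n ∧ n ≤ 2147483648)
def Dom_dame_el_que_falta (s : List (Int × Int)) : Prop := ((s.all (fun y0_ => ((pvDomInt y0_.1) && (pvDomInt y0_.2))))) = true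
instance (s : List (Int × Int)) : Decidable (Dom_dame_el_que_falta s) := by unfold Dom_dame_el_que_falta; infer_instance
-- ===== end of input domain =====

-- B replaces A's build-the-whole-grid-and-track-the-last-missing scan by a backward search
-- with early exit over a hash set of the present tuples (return value only; no mutation).

-- ===== PORT A =====
-- esta_la_tupla_incluida
def pvEsta (tupla : Int × Int) (tuplas : List (Int × Int)) : Bool :=
  match tuplas with
  | [] => false
  | tup :: rest => if tup = tupla then true else pvEsta tupla rest

-- obtener_maximo_tupla; tupla[0] raises IndexError on [] — excluded by Pre_, headD's default is never read there
def pvObtenerMaximo (tupla : List (Int × Int)) : Int :=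
  let h := tupla.headD (0, 0)
  let p := tupla.foldl
    (fun (m : Int × Int) q =>
      (if q.1 > m.1 then q.1 else m.1, if q.2 > m.2 then q.2 else m.2))
    (h.1, h.2)
  if p.1 > p.2 then p.1 else p.2

-- generar_tuplas_combinatoria
def pvGenerarTuplas (maximo : Int) : List (Int × Int) :=
  (PySem.List.pyRange 1 (maximo + 1) 1).foldl
    (fun tuplas i =>
      (PySem.List.pyRange 1 (maximo + 1) 1).foldl (fun tuplas2 j => tuplas2 ++ [(i, j)]) tuplas)
    []

def dame_el_que_falta (s : List (Int × Int)) : Int × Int :=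
  let maximo := pvObtenerMaximo s
  let tuplas_totales := pvGenerarTuplas maximo
  tuplas_totales.foldl (fun res tupla => if pvEsta tupla s then res else tupla) (1, 1)

-- ===== PORT B =====
-- inner 'for j in range(maximo, 0, -1)' with early return
def pvBuscaFila (presentes : List (Int × Int)) (i : Int) : List Int → Option (Int × Int)
  | [] => none
  | j :: js => if (i, j) ∈ presentes then pvBuscaFila presentes i js else some (i, j)

-- outer 'for i in range(maximo, 0, -1)' with early return
def pvBusca (presentes : List (Int × Int)) (js : List Int) : List Int → Option (Int × Int)
  | [] => none
  | i :: is_ =>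
    match pvBuscaFila presentes i js with
    | some r => some r
    | none => pvBusca presentes js is_

-- max(max(a, b) for (a, b) in s): PySem.List.max? with identity key; it is none only for s = [],
-- where Python raises ValueError — excluded by Pre_, so getD's default is never read
def dame_el_que_falta_alt (s : List (Int × Int)) : Int × Int :=
  let maximo := (PySem.List.max? (s.map (fun q => max q.1 q.2)) id).getD 0
  let presentes := PySem.Set.ofList s
  let back := PySem.List.pyRange maximo 0 (-1)
  (pvBusca presentes back back).getD (1, 1)

-- ===== PRECONDITION & SPEC =====
-- Pre_ excludes only the empty list, on which A raises IndexError (and B raises ValueError)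
def Pre_dame_el_que_falta (s : List (Int × Int)) : Prop := s ≠ []
instance (s : List (Int × Int)) : Decidable (Pre_dame_el_que_falta s) := by unfold Pre_dame_el_que_falta; infer_instance
def pvWitness_dame_el_que_falta : (List (Int × Int)) := [((2 : Int), (2 : Int))]

def Spec_dame_el_que_falta (s : List (Int × Int)) (out : Int × Int) : Prop := out = dame_el_que_falta_alt s
instance (s : List (Int × Int)) (out : Int × Int) : Decidable (Spec_dame_el_que_falta s out) := by unfold Spec_dame_el_que_falta; infer_instance

-- ===== CLAIM (what is proved, stated in full; the proofs are below) =====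
def Claim_equal_dame_el_que_falta : Prop := ∀ (s : List (Int × Int)), Dom_dame_el_que_falta s → Pre_dame_el_que_falta s → Spec_dame_el_que_falta s (dame_el_que_falta s)

-- ===== LEMMAS AND PROOFS =====

theorem pvEsta_eq_decide (t : Int × Int) (xs : List (Int × Int)) :
    pvEsta t xs = decide (t ∈ xs) := by
  induction xs with
  | nil => simp [pvEsta]
  | cons x rest ih =>
    by_cases h : x = t
    · simp [pvEsta, h]
    · simp [pvEsta, h, ih, Ne.symm h]

-- A's scan keeping the LAST non-member = first non-member of the reversed list
theorem foldl_keep_last {α : Type} (p : α → Bool) (l : List α) (r : α) :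
    l.foldl (fun res t => if p t then res else t) r
      = ((l.reverse.find? (fun t => !p t)).getD r) := by
  induction l generalizing r with
  | nil => simp
  | cons t ls ih =>
    simp only [List.foldl_cons, ih, List.reverse_cons, List.find?_append]
    cases h : ls.reverse.find? (fun t => !p t) <;> cases hp : p t <;>
      simp [List.find?, hp]

theorem pvBuscaFila_eq_find? (pres : List (Int × Int)) (i : Int) (js : List Int) :
    pvBuscaFila pres i js
      = (js.map (fun j => (i, j))).find? (fun t => !decide (t ∈ pres)) := by
  induction js with
  | nil => simp [pvBuscaFila]
  | cons j js ih =>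
    by_cases h : (i, j) ∈ pres <;> simp [pvBuscaFila, h, ih]

theorem pvBusca_eq_find? (pres : List (Int × Int)) (js : List Int) (is_ : List Int) :
    pvBusca pres js is_
      = (is_.flatMap (fun i => js.map (fun j => (i, j)))).find? (fun t => !decide (t ∈ pres)) := by
  induction is_ with
  | nil => simp [pvBusca]
  | cons i is_ ih =>
    simp only [pvBusca, pvBuscaFila_eq_find?, ih, List.flatMap_cons, List.find?_append]
    cases (List.map (fun j => (i, j)) js).find? (fun t => !decide (t ∈ pres)) <;> simp

theorem pvGenerarTuplas_eq_flatMap (m : Int) :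
    pvGenerarTuplas m
      = (PySem.List.pyRange 1 (m + 1) 1).flatMap
          (fun i => (PySem.List.pyRange 1 (m + 1) 1).map (fun j => (i, j))) := by
  unfold pvGenerarTuplas
  have h1 : ∀ (acc : List (Int × Int)) (i : Int),
      (PySem.List.pyRange 1 (m + 1) 1).foldl (fun t2 j => t2 ++ [(i, j)]) acc
        = acc ++ (PySem.List.pyRange 1 (m + 1) 1).map (fun j => (i, j)) :=
    fun acc i => PySem.List.foldl_append_singleton_eq_map _ _ _
  simp only [h1]
  rw [PySem.List.foldl_append_eq_flatMap]
  simp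

theorem max?_int_eq (l : List Int) (a : Int) :
    PySem.List.max? (a :: l) id = some (l.foldl (fun m x => if m < x then x else m) a) := by
  induction l generalizing a with
  | nil => rfl
  | cons x l ih =>
    have h := ih (if a < x then x else a)
    simp only [PySem.List.max?, List.foldl_cons, id] at h ⊢
    split at h <;> split <;> simp_all

theorem pair_fold_max (l : List (Int × Int)) (a b : Int) :
    (fun pr : Int × Int => if pr.1 > pr.2 then pr.1 else pr.2)
      (l.foldl (fun (m : Int × Int) q =>
        (if q.1 > m.1 then q.1 else m.1, if q.2 > m.2 then q.2 else m.2)) (a, b))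
      = (l.map (fun q => max q.1 q.2)).foldl (fun m x => if m < x then x else m) (max a b) := by
  induction l generalizing a b with
  | nil =>
    simp only [List.foldl_nil, List.map_nil, gt_iff_lt, max_def]
    split_ifs <;> omega
  | cons q l ih =>
    simp only [List.foldl_cons, List.map_cons]
    have e1 : (if q.1 > a then q.1 else a) = max a q.1 := by
      simp only [gt_iff_lt, max_def]; split_ifs <;> omega
    have e2 : (if q.2 > b then q.2 else b) = max b q.2 := by
      simp only [gt_iff_lt, max_def]; split_ifs <;> omega
    have e3 : (if max a b < max q.1 q.2 then max q.1 q.2 else max a b)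
        = max (max a q.1) (max b q.2) := by
      simp only [max_def]; split_ifs <;> omega
    rw [e1, e2, e3]
    exact ih _ _

theorem maximo_agree (p : Int × Int) (l : List (Int × Int)) :
    pvObtenerMaximo (p :: l)
      = ((PySem.List.max? ((p :: l).map (fun q => max q.1 q.2)) id).getD 0) := by
  simp only [pvObtenerMaximo, List.headD_cons, List.foldl_cons, gt_iff_lt, lt_irrefl,
    ite_self, List.map_cons]
  rw [max?_int_eq, Option.getD_some]
  exact pair_fold_max l p.1 p.2

-- B's backward grid is the reverse of A's forward grid
theorem back_grid_eq_reverse (m : Int) :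
    (PySem.List.pyRange m 0 (-1)).flatMap
        (fun i => (PySem.List.pyRange m 0 (-1)).map (fun j => (i, j)))
      = ((PySem.List.pyRange 1 (m + 1) 1).flatMap
          (fun i => (PySem.List.pyRange 1 (m + 1) 1).map (fun j => (i, j)))).reverse := by
  have hb : PySem.List.pyRange m 0 (-1) = (PySem.List.pyRange 1 (m + 1) 1).reverse := by
    have := PySem.List.pyRange_neg_one_eq_reverse m 0
    norm_num at this
    exact this
  rw [List.reverse_flatMap, hb]
  simp [Function.comp_def, List.map_reverse]

-- ===== VERDICT (by name: the statement is the Claim_ definition above) =====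
theorem dame_el_que_falta_spec : Claim_equal_dame_el_que_falta := by
  intro s _ hpre
  obtain ⟨p, l, rfl⟩ := List.exists_cons_of_ne_nil hpre
  simp only [Spec_dame_el_que_falta, dame_el_que_falta, dame_el_que_falta_alt]
  rw [← maximo_agree p l]
  rw [pvGenerarTuplas_eq_flatMap, pvBusca_eq_find?, back_grid_eq_reverse]
  rw [foldl_keep_last (fun tupla => pvEsta tupla (p :: l))]
  congr 2
  funext t
  rw [pvEsta_eq_decide]
  simp [PySem.Set.mem_ofList]
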